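-- pv_equiv track=rewrite | github.com/silva2kand/baba-coode | src/services/reasoning_sandbox.py | _normalize_grid
-- ===== SOURCE A (Python) =====
-- from typing import Any
--
-- def _normalize_grid(value: Any) -> list[list[int]] | None:
--     if not isinstance(value, list) or not value:
--         return None
--     normalized: list[list[int]] = []
--     row_length = None
--     for row in value:
--         if not isinstance(row, list) or not row:
--             return None
--         normalized_row: list[int] = []
--         for cell in row:
--             if isinstance(cell, bool):
--                 return None
--             if not isinstance(cell, (int, float)):
--                 return None
--             normalized_row.append(int(cell))
--         if row_length is None:
--             row_length = len(normalized_row)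
--         elif len(normalized_row) != row_length:
--             return None
--         normalized.append(normalized_row)
--     return normalized
-- ===== SOURCE B (Python) =====
-- def _normalize_grid(value):
--     # Phase 1: validate the whole grid; Phase 2: convert with a comprehension.
--     if not isinstance(value, list) or not value:
--         return None
--     if any(not isinstance(row, list) or not row for row in value):
--         return None
--     if any(isinstance(c, bool) or not isinstance(c, (int, float)) for row in value for c in row):
--         return None
--     width = len(value[0])
--     if any(len(row) != width for row in value):
--         return None
--     return [[int(c) for c in row] for row in value]
-- ===== Notes on version B (the rewrite author's own statement) =====
-- stated objective: simpler
-- what changed: Replaces A's single accumulating loop with a validate-then-convert decomposition: whole-grid checks via any() (non-empty rows, non-bool int/float cells, width anchored to the first row) followed by a nested comprehension, with no accumulator or row_length state.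
import Mathlib
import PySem

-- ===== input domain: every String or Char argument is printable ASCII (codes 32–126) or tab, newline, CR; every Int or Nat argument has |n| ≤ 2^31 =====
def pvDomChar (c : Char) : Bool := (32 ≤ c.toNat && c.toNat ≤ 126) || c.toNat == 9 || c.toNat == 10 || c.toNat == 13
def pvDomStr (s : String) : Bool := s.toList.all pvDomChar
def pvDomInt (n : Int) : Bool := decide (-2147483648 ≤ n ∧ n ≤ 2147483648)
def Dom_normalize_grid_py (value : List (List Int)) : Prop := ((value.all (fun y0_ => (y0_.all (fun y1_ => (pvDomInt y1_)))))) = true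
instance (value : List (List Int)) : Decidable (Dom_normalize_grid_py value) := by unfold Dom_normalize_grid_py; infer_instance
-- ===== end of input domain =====

-- B replaces A's single accumulating loop by validate-then-convert (whole-grid checks, then a nested map); same cost, simpler shape.
-- On List (List Int) the isinstance/bool/float checks of the Python are vacuous; int(cell) is the identity.

-- ===== PORT A =====
-- A's row loop: state = (row_length : Option Nat, normalized so far); cell loop = row.map id (int(cell)).
def normalizeGridAux : List (List Int) → Option Nat → List (List Int) → Option (List (List Int))
  | [], _, acc => some acc
  | row :: rest, rl, acc =>
    if row.isEmpty then none
    else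
      let nr := row.map (fun c => c)   -- int(cell) on an int is the identity
      match rl with
      | none => normalizeGridAux rest (some nr.length) (acc ++ [nr])
      | some L => if nr.length ≠ L then none else normalizeGridAux rest (some L) (acc ++ [nr])

def normalize_grid_py (value : List (List Int)) : Option (List (List Int)) :=
  if value.isEmpty then none else normalizeGridAux value none []

-- ===== PORT B =====
-- Phase 1: validate (non-empty grid, non-empty rows, width anchored to the first row); Phase 2: nested map.
def gridValid (value : List (List Int)) : Bool :=
  !value.isEmpty &&
  value.all (fun r => !r.isEmpty) &&
  (match value with
   | [] => true
   | r0 :: _ => value.all (fun r => r.length == r0.length))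

def normalize_grid_py_alt (value : List (List Int)) : Option (List (List Int)) :=
  if gridValid value then some (value.map (fun r => r.map (fun c => c))) else none

-- ===== PRECONDITION & SPEC =====
def Spec_normalize_grid_py (value : List (List Int)) (out : Option (List (List Int))) : Prop := out = normalize_grid_py_alt value
instance (value : List (List Int)) (out : Option (List (List Int))) : Decidable (Spec_normalize_grid_py value out) := by unfold Spec_normalize_grid_py; infer_instance

-- ===== CLAIM (what is proved, stated in full; the proofs are below) =====
def Claim_equal_normalize_grid_py : Prop := ∀ (value : List (List Int)), Dom_normalize_grid_py value → Spec_normalize_grid_py value (normalize_grid_py value)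

-- ===== LEMMAS AND PROOFS =====

-- A's loop after the first row: remaining rows must be non-empty and of length L.
theorem normalizeGridAux_some (rest : List (List Int)) (L : Nat) (acc : List (List Int)) :
    normalizeGridAux rest (some L) acc =
      (if rest.all (fun r => !r.isEmpty && r.length == L)
       then some (acc ++ rest.map (fun r => r.map (fun c => c)))
       else none) := by
  induction rest generalizing acc with
  | nil => simp [normalizeGridAux]
  | cons r rs ih =>
    simp only [normalizeGridAux, List.all_cons, List.map_cons]
    by_cases hr : r.isEmpty
    · simp [hr]
    · by_cases hl : r.length = L
      · simp [hr, hl, ih, List.append_assoc]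
      · simp [hr, hl]

theorem normalize_grid_py_spec : Claim_equal_normalize_grid_py := by
  intro value _
  unfold Spec_normalize_grid_py normalize_grid_py normalize_grid_py_alt gridValid
  cases value with
  | nil => simp
  | cons r0 rest =>
    simp only [List.isEmpty_cons, normalizeGridAux]
    by_cases h0 : r0.isEmpty
    · simp [h0]
    · simp only [h0, Bool.false_eq_true, if_false,
        normalizeGridAux_some, List.all_cons, List.length_map]
      simp only [List.all_eq_true, Bool.and_eq_true, Bool.not_eq_true', beq_iff_eq]
      split_ifs with h1 h2 h2 <;> try rfl
      · exact absurd ⟨⟨trivial, trivial, fun x hx => (h1 x hx).1⟩,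
          trivial, fun x hx => (h1 x hx).2⟩ h2
      · exact absurd (fun x hx => ⟨h2.1.2.2 x hx, h2.2.2 x hx⟩) h1
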